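-- pv_equiv track=rewrite | github.com/NJU-EALAB/acoustic-environment-perception | array position measurement/Math.py | q_dot
-- ===== SOURCE A (Python) =====
-- def q_dot(q1,q2):
--     q = [0 for i in range(4)]
--     s1 = q1[0]
--     v1 = q1[1:4]
--     s2 = q2[0]
--     v2 = q2[1:4]
--
--     v1v2 = v1[0] * v2[0] + v1[1] * v2[1] + v1[2] * v2[2]
--     v1xv2 = [v1[1] * v2[2] - v1[2] * v2[1], v1[2] * v2[0] - v1[0] * v2[2], v1[0] * v2[1] - v1[1] * v2[0]]
--
--     q[0] = s1*s2 - v1v2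
--     q[1:4] = [s1*v2[i]+s2*v1[i]+v1xv2[i] for i in range(3)]
--     return q
-- ===== SOURCE B (Python) =====
-- def q_dot(q1, q2):
--     a, b, c, d = q1[0], q1[1], q1[2], q1[3]
--     L = [[a, -b, -c, -d],
--          [b,  a, -d,  c],
--          [c,  d,  a, -b],
--          [d, -c,  b,  a]]
--     return [sum(row[j] * q2[j] for j in range(4)) for row in L]
-- ===== Notes on version B (the rewrite author's own statement) =====
-- stated objective: alternative
-- what changed: B replaces A's scalar/vector decomposition (dot product + cross product + slice assignment) with the standard 4x4 left-multiplication quaternion matrix built from q1, computing each output component as a row-by-vector dot product in a loop.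
import Mathlib
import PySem

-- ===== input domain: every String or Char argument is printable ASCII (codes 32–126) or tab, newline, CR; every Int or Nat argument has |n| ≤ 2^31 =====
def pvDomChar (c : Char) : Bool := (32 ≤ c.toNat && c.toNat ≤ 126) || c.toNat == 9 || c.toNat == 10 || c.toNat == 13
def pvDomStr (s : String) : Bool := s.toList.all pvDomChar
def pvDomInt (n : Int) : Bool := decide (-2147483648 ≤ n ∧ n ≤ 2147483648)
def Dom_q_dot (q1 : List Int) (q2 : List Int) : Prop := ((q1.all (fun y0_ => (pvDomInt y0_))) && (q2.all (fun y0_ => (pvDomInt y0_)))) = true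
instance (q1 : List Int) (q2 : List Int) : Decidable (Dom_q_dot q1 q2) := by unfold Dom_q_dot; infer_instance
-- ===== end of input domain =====

-- B computes the quaternion product via the 4x4 left-multiplication matrix of q1 (row·q2 sums)
-- instead of A's scalar/vector dot-and-cross decomposition with slice assignment (objective: alternative).


-- ===== PORT A =====
-- literal transliteration of A; indexing uses pyGet? (none = IndexError, excluded by Pre_), default 0 outside Pre_
def q_dot (q1 : List Int) (q2 : List Int) : List Int :=
  let q : List Int := (PySem.List.pyRange 0 4 1).map (fun _ => (0 : Int))
  let s1 := (PySem.List.pyGet? q1 0).getD 0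
  let v1 := PySem.List.slice q1 (some 1) (some 4)
  let s2 := (PySem.List.pyGet? q2 0).getD 0
  let v2 := PySem.List.slice q2 (some 1) (some 4)
  let v1v2 := (PySem.List.pyGet? v1 0).getD 0 * (PySem.List.pyGet? v2 0).getD 0
            + (PySem.List.pyGet? v1 1).getD 0 * (PySem.List.pyGet? v2 1).getD 0
            + (PySem.List.pyGet? v1 2).getD 0 * (PySem.List.pyGet? v2 2).getD 0
  let v1xv2 : List Int :=
    [ (PySem.List.pyGet? v1 1).getD 0 * (PySem.List.pyGet? v2 2).getD 0
        - (PySem.List.pyGet? v1 2).getD 0 * (PySem.List.pyGet? v2 1).getD 0,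
      (PySem.List.pyGet? v1 2).getD 0 * (PySem.List.pyGet? v2 0).getD 0
        - (PySem.List.pyGet? v1 0).getD 0 * (PySem.List.pyGet? v2 2).getD 0,
      (PySem.List.pyGet? v1 0).getD 0 * (PySem.List.pyGet? v2 1).getD 0
        - (PySem.List.pyGet? v1 1).getD 0 * (PySem.List.pyGet? v2 0).getD 0 ]
  let q := q.set 0 (s1 * s2 - v1v2)
  -- q[1:4] = [...]  (slice assignment replaces elements 1..3)
  let rep := (PySem.List.pyRange 0 3 1).map
      (fun i => s1 * (PySem.List.pyGet? v2 i).getD 0 + s2 * (PySem.List.pyGet? v1 i).getD 0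
                  + (PySem.List.pyGet? v1xv2 i).getD 0)
  q.take 1 ++ rep ++ q.drop 4

-- ===== PORT B =====
def q_dot_alt (q1 : List Int) (q2 : List Int) : List Int :=
  let a := (PySem.List.pyGet? q1 0).getD 0
  let b := (PySem.List.pyGet? q1 1).getD 0
  let c := (PySem.List.pyGet? q1 2).getD 0
  let d := (PySem.List.pyGet? q1 3).getD 0
  let L : List (List Int) := [[a, -b, -c, -d], [b, a, -d, c], [c, d, a, -b], [d, -c, b, a]]
  L.map (fun row =>
    ((PySem.List.pyRange 0 4 1).map
      (fun j => (PySem.List.pyGet? row j).getD 0 * (PySem.List.pyGet? q2 j).getD 0)).sum)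

-- ===== PRECONDITION & SPEC =====
-- A raises IndexError when either argument has fewer than 4 elements; Pre_ excludes exactly those.
def Pre_q_dot (q1 : List Int) (q2 : List Int) : Prop := 4 ≤ q1.length ∧ 4 ≤ q2.length
instance (q1 : List Int) (q2 : List Int) : Decidable (Pre_q_dot q1 q2) := by unfold Pre_q_dot; infer_instance
def pvWitness_q_dot : List Int × List Int := ([1, 2, 3, 4], [5, 6, 7, 8])

def Spec_q_dot (q1 : List Int) (q2 : List Int) (out : List Int) : Prop := out = q_dot_alt q1 q2
instance (q1 : List Int) (q2 : List Int) (out : List Int) : Decidable (Spec_q_dot q1 q2 out) := by unfold Spec_q_dot; infer_instance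

-- ===== CLAIM (what is proved, stated in full; the proofs are below) =====
def Claim_equal_q_dot : Prop := ∀ (q1 : List Int) (q2 : List Int), Dom_q_dot q1 q2 → Pre_q_dot q1 q2 → Spec_q_dot q1 q2 (q_dot q1 q2)

-- ===== LEMMAS AND PROOFS =====

-- ===== VERDICT (by name: the statement is the Claim_ definition above) =====
theorem q_dot_spec : Claim_equal_q_dot := by
  intro q1 q2 _ hpre
  obtain ⟨h1, h2⟩ := hpre
  match q1, q2 with
  | a :: b :: c :: d :: t1, e :: f :: g :: h :: t2 =>
    show q_dot _ _ = q_dot_alt _ _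
    simp [q_dot, q_dot_alt, PySem.List.pyGet?, PySem.List.pyIdx?, PySem.List.slice,
          PySem.List.pyRange, List.range_succ]
    split_ifs <;> try (exfalso; omega)
    norm_num
    refine ⟨by ring, by ring, by ring, by ring⟩
  | [], _ => simp at h1
  | [_], _ => simp at h1
  | [_, _], _ => simp at h1
  | [_, _, _], _ => simp at h1
  | _ :: _ :: _ :: _ :: _, [] => simp at h2
  | _ :: _ :: _ :: _ :: _, [_] => simp at h2
  | _ :: _ :: _ :: _ :: _, [_, _] => simp at h2
  | _ :: _ :: _ :: _ :: _, [_, _, _] => simp at h2
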